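-- pv_equiv track=rewrite | github.com/mark-mucchetti/wordle-analysis | wordle-evaluator.py | updateFrequencyTable
-- ===== SOURCE A (Python) =====
-- def updateFrequencyTable(frequencyTable, exactMatches, guess, result):
--
--     curFrequency = {}
--     for j in range(0, len(guess)):
--     # add this letter to the table if we've never seen it before
--         frequencyTable[guess[j]] = frequencyTable.setdefault(guess[j], (0, False))
--
--         if result[j] == "G":
--             curFrequency[guess[j]] = curFrequency.setdefault(guess[j],0)+1
--             exactMatches[j] = guess[j]
--         elif result[j] == "Y":
--             curFrequency[guess[j]] = curFrequency.setdefault(guess[j],0)+1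
--             exactMatches[j] = exactMatches[j].replace(guess[j],"")
--         else:
--             # we've found all of this letter, lock to exact count
--             exactMatches[j] = exactMatches[j].replace(guess[j],"")
--             frequencyTable[guess[j]] = (frequencyTable[guess[j]][0], True)
--
--     # process current frequencies into stateful frequency table and update minima
--     for k in curFrequency.keys():
--         if (frequencyTable[k][0] < curFrequency[k]):
--             frequencyTable[k] = (curFrequency[k], frequencyTable[k][1])
--
--     return (frequencyTable, exactMatches)
-- ===== SOURCE B (Python) =====
-- def updateFrequencyTable(frequencyTable, exactMatches, guess, result):
--     # Two independent stages instead of one stateful simulation: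
--     # stage 1 fixes exactMatches position by position; stage 2 handles the
--     # frequency table per DISTINCT letter by aggregating over the whole guess
--     # (count of G/Y hits, whether any B occurrence locks the letter), so no
--     # running curFrequency dict is kept at all.
--     for j in range(len(guess)):
--         if result[j] == "G":
--             exactMatches[j] = guess[j]
--         else:
--             exactMatches[j] = exactMatches[j].replace(guess[j], "")
--     for g in dict.fromkeys(guess):
--         cnt = sum(1 for j in range(len(guess))
--                   if guess[j] == g and result[j] in ("G", "Y"))
--         locked = any(guess[j] == g and result[j] not in ("G", "Y")
--                      for j in range(len(guess)))
--         old = frequencyTable.get(g, (0, False))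
--         frequencyTable[g] = (max(old[0], cnt) if cnt else old[0],
--                              old[1] or locked)
--     return (frequencyTable, exactMatches)
-- ===== Notes on version B (the rewrite author's own statement) =====
-- stated objective: alternative
-- what changed: B replaces A's stateful single simulation (positional loop threading a running curFrequency dict plus a trailing scan over curFrequency.keys()) with two independent stages: a positional pass that only fixes exactMatches, then a group-by-letter pass over dict.fromkeys(guess) that recomputes each distinct letter's G/Y count and lock flag by aggregating over the whole guess, so no running counter dict exists at all.
import Mathlib
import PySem

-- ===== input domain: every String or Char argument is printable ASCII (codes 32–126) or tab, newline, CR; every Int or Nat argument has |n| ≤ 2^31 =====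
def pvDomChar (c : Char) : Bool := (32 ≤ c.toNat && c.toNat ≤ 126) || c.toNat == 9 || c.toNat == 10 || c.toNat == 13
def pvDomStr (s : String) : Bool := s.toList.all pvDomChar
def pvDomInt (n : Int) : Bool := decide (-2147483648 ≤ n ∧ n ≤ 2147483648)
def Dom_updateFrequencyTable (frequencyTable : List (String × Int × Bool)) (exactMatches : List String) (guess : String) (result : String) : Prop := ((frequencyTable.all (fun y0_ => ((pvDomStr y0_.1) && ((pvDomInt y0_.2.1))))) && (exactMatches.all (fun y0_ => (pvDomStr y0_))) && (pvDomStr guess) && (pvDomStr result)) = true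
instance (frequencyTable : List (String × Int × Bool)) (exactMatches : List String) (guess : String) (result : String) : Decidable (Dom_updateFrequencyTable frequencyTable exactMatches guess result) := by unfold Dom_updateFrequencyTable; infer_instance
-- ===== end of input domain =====

-- B replaces A's stateful simulation (positional loop threading a running curFrequency dict,
-- then a trailing scan over its keys) by two independent stages: a positional pass that only
-- fixes exactMatches, then a group-by-letter pass over dict.fromkeys(guess) that recomputes each
-- distinct letter's G/Y count and lock flag by aggregating over the whole guess (objective:
-- alternative). Return value only: the Python originals also mutate frequencyTable /
-- exactMatches in place (both A and B do so alike).

-- ===== PORT A =====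
-- loop body of A's first pass: state = (frequencyTable, exactMatches, curFrequency), index j
def pyAStep (gs rs : List Char) (st : PySem.Dict String (Int × Bool) × List String × PySem.Dict String Int)
    (j : Nat) : PySem.Dict String (Int × Bool) × List String × PySem.Dict String Int :=
  let g := String.ofList [gs.getD j ' ']
  let ft := st.1.setdefault g (0, false)
  if rs.getD j ' ' = 'G' then
    (ft, st.2.1.set j g, st.2.2.insert g (st.2.2.getD g 0 + 1))
  else if rs.getD j ' ' = 'Y' then
    (ft, st.2.1.set j (PySem.Str.replace (st.2.1.getD j "") g ""), st.2.2.insert g (st.2.2.getD g 0 + 1))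
  else
    (ft.insert g ((ft.getD g (0, false)).1, true),
     st.2.1.set j (PySem.Str.replace (st.2.1.getD j "") g ""), st.2.2)

-- loop body of A's trailing minimum-raise pass over curFrequency.keys()
def rstep (cur : PySem.Dict String Int) (d : PySem.Dict String (Int × Bool)) (k : String) :
    PySem.Dict String (Int × Bool) :=
  if (d.getD k (0, false)).1 < cur.getD k 0 then d.insert k (cur.getD k 0, (d.getD k (0, false)).2) else d

def pyASecond (ft : PySem.Dict String (Int × Bool)) (cur : PySem.Dict String Int) :
    PySem.Dict String (Int × Bool) :=
  cur.keys.foldl (rstep cur) ft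

def updateFrequencyTable (frequencyTable : List (String × Int × Bool)) (exactMatches : List String) (guess : String) (result : String) : (List (String × Int × Bool)) × List String :=
  let s := (List.range guess.toList.length).foldl (pyAStep guess.toList result.toList)
             (PySem.Dict.mk frequencyTable, exactMatches, PySem.Dict.empty)
  ((pyASecond s.1 s.2.2).items, s.2.1)

-- ===== PORT B =====
-- stage 1 loop body: fix exactMatches[j]
def pyBEm (gs rs : List Char) (em : List String) (j : Nat) : List String :=
  if rs.getD j ' ' = 'G' then em.set j (String.ofList [gs.getD j ' '])
  else em.set j (PySem.Str.replace (em.getD j "") (String.ofList [gs.getD j ' ']) "")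

-- cnt = sum(1 for j in range(len(guess)) if guess[j] == g and result[j] in ("G","Y"))
def pyBCnt (gs rs : List Char) (g : Char) : Int :=
  (((List.range gs.length).filter
    (fun j => gs.getD j ' ' == g && (rs.getD j ' ' == 'G' || rs.getD j ' ' == 'Y'))).length : Int)

-- locked = any(guess[j] == g and result[j] not in ("G","Y") for j in range(len(guess)))
def pyBLock (gs rs : List Char) (g : Char) : Bool :=
  (List.range gs.length).any
    (fun j => gs.getD j ' ' == g && !(rs.getD j ' ' == 'G' || rs.getD j ' ' == 'Y'))

-- stage 2 loop body: per distinct letter g, one aggregated table update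
def pyBUpd (gs rs : List Char) (d : PySem.Dict String (Int × Bool)) (g : Char) :
    PySem.Dict String (Int × Bool) :=
  let cnt := pyBCnt gs rs g
  let old := d.getD (String.ofList [g]) (0, false)
  d.insert (String.ofList [g]) (if cnt ≠ 0 then max old.1 cnt else old.1, old.2 || pyBLock gs rs g)

def updateFrequencyTable_alt (frequencyTable : List (String × Int × Bool)) (exactMatches : List String) (guess : String) (result : String) : (List (String × Int × Bool)) × List String :=
  let gs := guess.toList
  let rs := result.toList
  let em := (List.range gs.length).foldl (pyBEm gs rs) exactMatches
  -- dict.fromkeys(guess) iterates the distinct letters in first-occurrence order = PySem.List.dedup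
  let d := (PySem.List.dedup gs).foldl (pyBUpd gs rs) (PySem.Dict.mk frequencyTable)
  (d.items, em)

-- ===== PRECONDITION & SPEC =====
-- Pre_ excludes (i) inputs where Python A raises IndexError (result or exactMatches shorter than
-- guess) and (ii) assoc lists with duplicate keys, which do not represent a Python dict at all
-- (frequencyTable is a dict in A, so its keys are distinct by construction).
def Pre_updateFrequencyTable (frequencyTable : List (String × Int × Bool)) (exactMatches : List String) (guess : String) (result : String) : Prop :=
  (frequencyTable.map Prod.fst).Nodup ∧
  guess.toList.length ≤ result.toList.length ∧ guess.toList.length ≤ exactMatches.length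
instance (frequencyTable : List (String × Int × Bool)) (exactMatches : List String) (guess : String) (result : String) : Decidable (Pre_updateFrequencyTable frequencyTable exactMatches guess result) := by unfold Pre_updateFrequencyTable; infer_instance

def pvWitness_updateFrequencyTable : (List (String × Int × Bool)) × List String × String × String :=
  ([("a", (1, false)), ("b", (0, true))], ["ab", "b", "c"], "aba", "GYB")

def Spec_updateFrequencyTable (frequencyTable : List (String × Int × Bool)) (exactMatches : List String) (guess : String) (result : String) (out : (List (String × Int × Bool)) × List String) : Prop := out = updateFrequencyTable_alt frequencyTable exactMatches guess result
instance (frequencyTable : List (String × Int × Bool)) (exactMatches : List String) (guess : String) (result : String) (out : (List (String × Int × Bool)) × List String) : Decidable (Spec_updateFrequencyTable frequencyTable exactMatches guess result out) := by unfold Spec_updateFrequencyTable; infer_instance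

-- ===== CLAIM (what is proved, stated in full; the proofs are below) =====
def Claim_equal_updateFrequencyTable : Prop := ∀ (frequencyTable : List (String × Int × Bool)) (exactMatches : List String) (guess : String) (result : String), Dom_updateFrequencyTable frequencyTable exactMatches guess result → Pre_updateFrequencyTable frequencyTable exactMatches guess result → Spec_updateFrequencyTable frequencyTable exactMatches guess result (updateFrequencyTable frequencyTable exactMatches guess result)

-- ===== LEMMAS AND PROOFS =====

-- abbreviations for the proof: the one-letter string, positional G/Y test, prefix aggregates
def strc (c : Char) : String := String.ofList [c]

def gyB (rs : List Char) (j : Nat) : Bool := (rs.getD j ' ' == 'G' || rs.getD j ' ' == 'Y')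

def cntS (gs rs : List Char) (n : Nat) (k : String) : Int :=
  (((List.range n).filter (fun j => strc (gs.getD j ' ') == k && gyB rs j)).length : Int)

def lockS (gs rs : List Char) (n : Nat) (k : String) : Bool :=
  (List.range n).any (fun j => strc (gs.getD j ' ') == k && !gyB rs j)

def occS (gs : List Char) (n : Nat) (k : String) : Bool :=
  (gs.take n).any (fun c => strc c == k)

-- the value B's aggregation assigns to a key of the guess, given its base table entry
def bSpec (gs rs : List Char) (v : Int × Bool) (k : String) : Int × Bool :=
  (if cntS gs rs gs.length k ≠ 0 then max v.1 (cntS gs rs gs.length k) else v.1,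
   v.2 || lockS gs rs gs.length k)

lemma strc_inj {a b : Char} (h : strc a = strc b) : a = b := by
  have := congrArg String.toList h
  simpa [strc] using this

lemma strc_beq (a b : Char) : (strc a == strc b) = (a == b) := by
  by_cases h : a = b
  · subst h; simp
  · have h2 : strc a ≠ strc b := fun he => h (strc_inj he)
    simp [h, h2]

-- invariant of A's first pass after n steps
def AInv (gs rs : List Char) (D0 : PySem.Dict String (Int × Bool)) (em0 : List String)
    (n : Nat) (s : PySem.Dict String (Int × Bool) × List String × PySem.Dict String Int) : Prop :=
  s.2.1 = (List.range n).foldl (pyBEm gs rs) em0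
  ∧ s.1.keys = D0.keys ++ ((PySem.List.dedup (gs.take n)).filter
        (fun c => !(D0.contains (strc c)))).map strc
  ∧ s.1.keys.Nodup
  ∧ (∀ k, s.1.get? k = if occS gs n k
        then some ((D0.getD k (0,false)).1, (D0.getD k (0,false)).2 || lockS gs rs n k)
        else D0.get? k)
  ∧ s.2.2.keys.Nodup
  ∧ (∀ k, k ∈ s.2.2.keys ↔ cntS gs rs n k ≠ 0)
  ∧ (∀ k, s.2.2.getD k 0 = cntS gs rs n k)

lemma occS_succ (gs : List Char) (n : Nat) (h : n < gs.length) (k : String) :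
    occS gs (n+1) k = (occS gs n k || (strc (gs.getD n ' ') == k)) := by
  have ht : gs.take (n+1) = gs.take n ++ [gs.getD n ' '] := by
    rw [List.take_add_one, List.getElem?_eq_getElem h, List.getD_eq_getElem gs ' ' h]
    rfl
  unfold occS
  rw [ht, List.any_append]
  simp

lemma cntS_succ (gs rs : List Char) (n : Nat) (k : String) :
    cntS gs rs (n+1) k
      = cntS gs rs n k + (if (strc (gs.getD n ' ') == k && gyB rs n) then 1 else 0) := by
  unfold cntS
  rw [List.range_succ, List.filter_append, List.length_append, List.filter_singleton]
  cases hc : (strc (gs.getD n ' ') == k && gyB rs n) <;>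
    simp_all [List.getD_eq_getElem?_getD]

lemma lockS_succ (gs rs : List Char) (n : Nat) (k : String) :
    lockS gs rs (n+1) k = (lockS gs rs n k || (strc (gs.getD n ' ') == k && !gyB rs n)) := by
  unfold lockS
  rw [List.range_succ]
  simp [List.any_append]

lemma cntS_nonneg (gs rs : List Char) (n : Nat) (k : String) : 0 ≤ cntS gs rs n k := by
  unfold cntS
  exact Int.natCast_nonneg _

lemma occ_of_idx (gs : List Char) {n j : Nat} (hn : n ≤ gs.length) (hj : j < n) (k : String)
    (h : (strc (gs.getD j ' ') == k) = true) : occS gs n k = true := by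
  unfold occS
  rw [List.any_eq_true]
  refine ⟨gs.getD j ' ', ?_, h⟩
  have hjl : j < gs.length := lt_of_lt_of_le hj hn
  have hjt : j < (gs.take n).length := by simp [List.length_take]; omega
  have := List.getElem_mem hjt
  rw [List.getElem_take] at this
  rw [List.getD_eq_getElem gs ' ' hjl]
  exact this

lemma lock_of_not_occ (gs rs : List Char) {n : Nat} (hn : n ≤ gs.length) (k : String)
    (h : occS gs n k = false) : lockS gs rs n k = false := by
  by_contra hl
  rw [Bool.not_eq_false] at hl
  unfold lockS at hl
  rw [List.any_eq_true] at hl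
  obtain ⟨j, hj, hp⟩ := hl
  rw [List.mem_range] at hj
  rw [Bool.and_eq_true] at hp
  rw [occ_of_idx gs hn hj k hp.1] at h
  simp at h

lemma cnt_of_not_occ (gs rs : List Char) {n : Nat} (hn : n ≤ gs.length) (k : String)
    (h : occS gs n k = false) : cntS gs rs n k = 0 := by
  unfold cntS
  have he : (List.range n).filter (fun j => strc (gs.getD j ' ') == k && gyB rs j) = [] := by
    rw [List.filter_eq_nil_iff]
    intro j hj hp
    rw [List.mem_range] at hj
    rw [Bool.and_eq_true] at hp
    rw [occ_of_idx gs hn hj k hp.1] at h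
    simp at h
  rw [he]
  rfl

lemma cnt_ne_zero_occ (gs rs : List Char) {n : Nat} (hn : n ≤ gs.length) (k : String)
    (h : cntS gs rs n k ≠ 0) : occS gs n k = true := by
  cases ho : occS gs n k
  · exact absurd (cnt_of_not_occ gs rs hn k ho) h
  · rfl

lemma mem_take_of_occ (gs : List Char) (n : Nat) (g : Char)
    (h : occS gs n (strc g) = true) : g ∈ gs.take n := by
  unfold occS at h
  rw [List.any_eq_true] at h
  obtain ⟨c, hc, hb⟩ := h
  rw [beq_iff_eq] at hb
  rwa [← strc_inj hb]

lemma not_mem_take_of_not_occ (gs : List Char) (n : Nat) (g : Char)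
    (h : occS gs n (strc g) = false) : g ∉ gs.take n := by
  intro hm
  have : occS gs n (strc g) = true := by
    unfold occS
    rw [List.any_eq_true]
    exact ⟨g, hm, by simp⟩
  rw [this] at h
  simp at h

-- bridges between B's per-character aggregates and the string-keyed ones
lemma cnt_strc (gs rs : List Char) (g : Char) : pyBCnt gs rs g = cntS gs rs gs.length (strc g) := by
  unfold pyBCnt cntS
  have hf : (fun j => gs.getD j ' ' == g && (rs.getD j ' ' == 'G' || rs.getD j ' ' == 'Y'))
      = (fun j => strc (gs.getD j ' ') == strc g && gyB rs j) := by
    funext j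
    rw [strc_beq]
    rfl
  rw [hf]

lemma lock_strc (gs rs : List Char) (g : Char) : pyBLock gs rs g = lockS gs rs gs.length (strc g) := by
  unfold pyBLock lockS
  have hf : (fun j => gs.getD j ' ' == g && !(rs.getD j ' ' == 'G' || rs.getD j ' ' == 'Y'))
      = (fun j => strc (gs.getD j ' ') == strc g && !gyB rs j) := by
    funext j
    rw [strc_beq]
    rfl
  rw [hf]

lemma AInv_zero (gs rs : List Char) (D0 : PySem.Dict String (Int × Bool)) (em0 : List String)
    (hD0 : D0.keys.Nodup) :
    AInv gs rs D0 em0 0 (D0, em0, PySem.Dict.empty) := by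
  refine ⟨rfl, by simp, hD0, ?_, ?_, ?_, ?_⟩
  · intro k
    simp [occS]
  · exact PySem.Dict.nodup_keys_empty
  · intro k
    simp [cntS, PySem.Dict.keys, PySem.Dict.empty]
  · intro k
    simp [cntS, PySem.Dict.getD_empty]

lemma setdefault_nodup (d : PySem.Dict String (Int × Bool)) (g : String) (v : Int × Bool)
    (h : d.keys.Nodup) : (d.setdefault g v).keys.Nodup := by
  cases hc : d.contains g
  · rw [PySem.Dict.setdefault_of_not_contains _ _ hc]
    exact PySem.Dict.nodup_keys_insert _ _ _ h
  · rw [PySem.Dict.setdefault_of_contains _ _ hc]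
    exact h

lemma AInv_step (gs rs : List Char) (D0 : PySem.Dict String (Int × Bool)) (em0 : List String)
    (n : Nat) (s : PySem.Dict String (Int × Bool) × List String × PySem.Dict String Int)
    (hn : n < gs.length) (h : AInv gs rs D0 em0 n s) :
    AInv gs rs D0 em0 (n+1) (pyAStep gs rs s n) := by
  obtain ⟨d, em, cur⟩ := s
  obtain ⟨h1, h2, h3, h4, h5, h6, h7⟩ := h
  have hn' : n ≤ gs.length := hn.le
  have hso : String.ofList [gs.getD n ' '] = strc (gs.getD n ' ') := rfl
  have hdcont : d.contains (strc (gs.getD n ' '))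
      = (occS gs n (strc (gs.getD n ' ')) || D0.contains (strc (gs.getD n ' '))) := by
    cases ho : occS gs n (strc (gs.getD n ' '))
    · rw [PySem.Dict.contains_eq_isSome_get?, h4 (strc (gs.getD n ' ')), ho, if_neg (by simp),
        ← PySem.Dict.contains_eq_isSome_get?, Bool.false_or]
    · rw [PySem.Dict.contains_eq_isSome_get?, h4 (strc (gs.getD n ' ')), ho, if_pos rfl]
      simp
  have ht : gs.take (n+1) = gs.take n ++ [gs.getD n ' '] := by
    rw [List.take_add_one, List.getElem?_eq_getElem hn, List.getD_eq_getElem gs ' ' hn]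
    rfl
  have hded : PySem.List.dedup (gs.take (n+1))
      = if gs.getD n ' ' ∈ gs.take n then PySem.List.dedup (gs.take n)
        else PySem.List.dedup (gs.take n) ++ [gs.getD n ' '] := by
    rw [ht]
    simp only [PySem.List.dedup_eq_ofList, PySem.Set.ofList_append_singleton]
    by_cases hm : gs.getD n ' ' ∈ gs.take n
    · rw [PySem.Set.add_of_mem (by rw [PySem.Set.mem_ofList]; exact hm), if_pos hm]
    · rw [PySem.Set.add_of_not_mem (by rw [PySem.Set.mem_ofList]; exact hm), if_neg hm]
  have hftkeys : (d.setdefault (strc (gs.getD n ' ')) (0,false)).keys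
      = D0.keys ++ ((PySem.List.dedup (gs.take (n+1))).filter
          (fun c => !(D0.contains (strc c)))).map strc := by
    cases ho : occS gs n (strc (gs.getD n ' '))
    · have hnm : gs.getD n ' ' ∉ gs.take n := not_mem_take_of_not_occ gs n _ ho
      rw [hded, if_neg hnm, List.filter_append, List.map_append, List.filter_singleton]
      cases hD0c : D0.contains (strc (gs.getD n ' '))
      · have hdc : d.contains (strc (gs.getD n ' ')) = false := by rw [hdcont, ho, hD0c]; rfl
        rw [PySem.Dict.setdefault_of_not_contains _ _ hdc,
          PySem.Dict.keys_insert_of_not_contains _ _ hdc, h2]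
        simp
      · have hdc : d.contains (strc (gs.getD n ' ')) = true := by rw [hdcont, ho, hD0c]; rfl
        rw [PySem.Dict.setdefault_of_contains _ _ hdc, h2]
        simp
    · have hdc : d.contains (strc (gs.getD n ' ')) = true := by rw [hdcont, ho]; rfl
      have hm : gs.getD n ' ' ∈ gs.take n := mem_take_of_occ gs n _ ho
      rw [PySem.Dict.setdefault_of_contains _ _ hdc, h2, hded, if_pos hm]
  have hftnodup : (d.setdefault (strc (gs.getD n ' ')) (0,false)).keys.Nodup :=
    setdefault_nodup d _ _ h3
  have hftget : ∀ k, (d.setdefault (strc (gs.getD n ' ')) (0,false)).get? k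
      = if occS gs (n+1) k
        then some ((D0.getD k (0,false)).1, (D0.getD k (0,false)).2 || lockS gs rs n k)
        else D0.get? k := by
    intro k
    by_cases hk : k = strc (gs.getD n ' ')
    · subst hk
      have hocc1 : occS gs (n+1) (strc (gs.getD n ' ')) = true := by
        rw [occS_succ gs n hn]
        simp
      rw [hocc1, if_pos rfl]
      cases ho : occS gs n (strc (gs.getD n ' '))
      · have hlock : lockS gs rs n (strc (gs.getD n ' ')) = false :=
          lock_of_not_occ gs rs hn' _ ho
        cases hD0c : D0.contains (strc (gs.getD n ' '))
        · have hdc : d.contains (strc (gs.getD n ' ')) = false := by rw [hdcont, ho, hD0c]; rfl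
          rw [PySem.Dict.setdefault_of_not_contains _ _ hdc, PySem.Dict.get?_insert, if_pos rfl,
            PySem.Dict.getD_of_not_contains _ _ hD0c, hlock]
          simp
        · have hdc : d.contains (strc (gs.getD n ' ')) = true := by rw [hdcont, ho, hD0c]; rfl
          have hs : (D0.get? (strc (gs.getD n ' '))).isSome := by
            rw [← PySem.Dict.contains_eq_isSome_get?]
            exact hD0c
          obtain ⟨v, hv⟩ := Option.isSome_iff_exists.mp hs
          rw [PySem.Dict.setdefault_of_contains _ _ hdc, h4, ho, if_neg (by simp), hv,
            PySem.Dict.getD_of_get?_eq_some _ _ hv, hlock]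
          simp
      · have hdc : d.contains (strc (gs.getD n ' ')) = true := by rw [hdcont, ho]; rfl
        rw [PySem.Dict.setdefault_of_contains _ _ hdc, h4, ho, if_pos rfl]
    · rw [PySem.Dict.get?_setdefault_of_ne _ _ hk, h4 k, occS_succ gs n hn]
      have hb : (strc (gs.getD n ' ') == k) = false := by
        simp
        exact fun e => hk e.symm
      rw [hb, Bool.or_false]
  unfold pyAStep
  simp only [hso]
  by_cases hG : rs.getD n ' ' = 'G'
  · rw [if_pos hG]
    have hgy : gyB rs n = true := by
      simp only [gyB, Bool.or_eq_true, beq_iff_eq]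
      exact Or.inl hG
    refine ⟨?_, hftkeys, hftnodup, ?_, PySem.Dict.nodup_keys_insert _ _ _ h5, ?_, ?_⟩
    · rw [List.range_succ, List.foldl_append, ← h1, List.foldl_cons, List.foldl_nil]
      unfold pyBEm
      rw [if_pos hG, hso]
    · intro k
      rw [lockS_succ, hgy]
      simpa using hftget k
    · intro k
      rw [PySem.Dict.mem_keys_insert, cntS_succ, hgy, Bool.and_true]
      by_cases hk : k = strc (gs.getD n ' ')
      · subst hk
        rw [if_pos (by simp)]
        have h0 := cntS_nonneg gs rs n (strc (gs.getD n ' '))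
        exact ⟨fun _ => by omega, fun _ => Or.inl rfl⟩
      · have hb : (strc (gs.getD n ' ') == k) = false := by
          simp only [beq_eq_false_iff_ne, ne_eq]
          exact fun e => hk e.symm
        rw [if_neg (by simp only [beq_iff_eq]; exact fun e => hk e.symm), add_zero]
        constructor
        · rintro (he | hm)
          · exact absurd he hk
          · exact (h6 k).mp hm
        · exact fun hc => Or.inr ((h6 k).mpr hc)
    · intro k
      rw [PySem.Dict.getD_insert, cntS_succ, hgy, Bool.and_true]
      by_cases hk : k = strc (gs.getD n ' ')
      · subst hk
        rw [if_pos rfl, if_pos (by simp), h7]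
      · have hb : (strc (gs.getD n ' ') == k) = false := by
          simp only [beq_eq_false_iff_ne, ne_eq]
          exact fun e => hk e.symm
        rw [if_neg hk, if_neg (by simp only [beq_iff_eq]; exact fun e => hk e.symm), add_zero]
        exact h7 k
  · rw [if_neg hG]
    by_cases hY : rs.getD n ' ' = 'Y'
    · rw [if_pos hY]
      have hgy : gyB rs n = true := by
        simp only [gyB, Bool.or_eq_true, beq_iff_eq]
        exact Or.inr hY
      refine ⟨?_, hftkeys, hftnodup, ?_, PySem.Dict.nodup_keys_insert _ _ _ h5, ?_, ?_⟩
      · rw [List.range_succ, List.foldl_append, ← h1, List.foldl_cons, List.foldl_nil]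
        unfold pyBEm
        rw [if_neg hG, hso]
      · intro k
        rw [lockS_succ, hgy]
        simpa using hftget k
      · intro k
        rw [PySem.Dict.mem_keys_insert, cntS_succ, hgy, Bool.and_true]
        by_cases hk : k = strc (gs.getD n ' ')
        · subst hk
          rw [if_pos (by simp)]
          have h0 := cntS_nonneg gs rs n (strc (gs.getD n ' '))
          exact ⟨fun _ => by omega, fun _ => Or.inl rfl⟩
        · have hb : (strc (gs.getD n ' ') == k) = false := by
            simp only [beq_eq_false_iff_ne, ne_eq]
            exact fun e => hk e.symm
          rw [if_neg (by simp only [beq_iff_eq]; exact fun e => hk e.symm), add_zero]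
          constructor
          · rintro (he | hm)
            · exact absurd he hk
            · exact (h6 k).mp hm
          · exact fun hc => Or.inr ((h6 k).mpr hc)
      · intro k
        rw [PySem.Dict.getD_insert, cntS_succ, hgy, Bool.and_true]
        by_cases hk : k = strc (gs.getD n ' ')
        · subst hk
          rw [if_pos rfl, if_pos (by simp), h7]
        · have hb : (strc (gs.getD n ' ') == k) = false := by
            simp only [beq_eq_false_iff_ne, ne_eq]
            exact fun e => hk e.symm
          rw [if_neg hk, if_neg (by simp only [beq_iff_eq]; exact fun e => hk e.symm), add_zero]
          exact h7 k
    · rw [if_neg hY]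
      have hgy : gyB rs n = false := by
        simp only [gyB, Bool.or_eq_false_iff, beq_eq_false_iff_ne, ne_eq]
        exact ⟨hG, hY⟩
      have hftc : (d.setdefault (strc (gs.getD n ' ')) (0,false)).contains (strc (gs.getD n ' '))
          = true := by
        rw [PySem.Dict.contains_setdefault]
        simp
      refine ⟨?_, ?_, ?_, ?_, h5, ?_, ?_⟩
      · rw [List.range_succ, List.foldl_append, ← h1, List.foldl_cons, List.foldl_nil]
        unfold pyBEm
        rw [if_neg hG, hso]
      · rw [PySem.Dict.keys_insert_of_contains _ _ hftc]
        exact hftkeys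
      · rw [PySem.Dict.keys_insert_of_contains _ _ hftc]
        exact hftnodup
      · intro k
        rw [PySem.Dict.get?_insert]
        by_cases hk : k = strc (gs.getD n ' ')
        · rw [if_pos hk]
          subst hk
          have h1st : ((d.setdefault (strc (gs.getD n ' ')) (0,false)).getD
                (strc (gs.getD n ' ')) (0,false)).1
              = (D0.getD (strc (gs.getD n ' ')) (0,false)).1 := by
            rw [PySem.Dict.getD_setdefault_self, PySem.Dict.getD_eq_get?_getD, h4]
            cases ho : occS gs n (strc (gs.getD n ' ')) <;>
              simp [PySem.Dict.getD_eq_get?_getD]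
          rw [h1st]
          have hocc : occS gs (n+1) (strc (gs.getD n ' ')) = true := by
            rw [occS_succ gs n hn]
            simp
          have hlock : lockS gs rs (n+1) (strc (gs.getD n ' ')) = true := by
            rw [lockS_succ, hgy]
            simp
          rw [hocc, hlock]
          simp
        · rw [if_neg hk, hftget k]
          have hb : (strc (gs.getD n ' ') == k) = false := by
            simp
            exact fun e => hk e.symm
          rw [occS_succ gs n hn, lockS_succ, hb]
          simp
      · intro k
        rw [cntS_succ, hgy, Bool.and_false]
        simpa using h6 k
      · intro k
        rw [cntS_succ, hgy, Bool.and_false]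
        simpa using h7 k

lemma AInv_fold (gs rs : List Char) (D0 : PySem.Dict String (Int × Bool)) (em0 : List String)
    (hD0 : D0.keys.Nodup) :
    ∀ n, n ≤ gs.length →
      AInv gs rs D0 em0 n ((List.range n).foldl (pyAStep gs rs) (D0, em0, PySem.Dict.empty)) := by
  intro n
  induction n with
  | zero => intro _; exact AInv_zero gs rs D0 em0 hD0
  | succ m ih =>
      intro hm
      rw [List.range_succ, List.foldl_append, List.foldl_cons, List.foldl_nil]
      exact AInv_step gs rs D0 em0 m _ (by omega) (ih (by omega))

-- A's second pass (proved facts about rstep/pyASecond)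
lemma rstep_keys (cur : PySem.Dict String Int) (d : PySem.Dict String (Int × Bool)) (k0 : String)
    (hc : d.contains k0 = true) : (rstep cur d k0).keys = d.keys := by
  unfold rstep; split
  · exact PySem.Dict.keys_insert_of_contains _ _ hc
  · rfl

lemma rstep_get? (cur : PySem.Dict String Int) (d : PySem.Dict String (Int × Bool)) (k0 : String)
    (hc : d.contains k0 = true) (k : String) :
    (rstep cur d k0).get? k =
      if k = k0 then (d.get? k0).map (fun v => (if v.1 < cur.getD k0 0 then cur.getD k0 0 else v.1, v.2))
      else d.get? k := by
  have hs : (d.get? k0).isSome := by rw [← PySem.Dict.contains_eq_isSome_get?]; exact hc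
  obtain ⟨v, hv⟩ := Option.isSome_iff_exists.mp hs
  have hgd : d.getD k0 (0, false) = v := PySem.Dict.getD_of_get?_eq_some _ _ hv
  by_cases he : k = k0
  · subst he
    rw [if_pos rfl, hv]
    unfold rstep
    rw [hgd]
    split_ifs with h1
    · rw [PySem.Dict.get?_insert]; simp [h1]
    · rw [hv]; simp [h1]
  · rw [if_neg he]
    unfold rstep
    rw [hgd]
    split_ifs with h1
    · rw [PySem.Dict.get?_insert]; simp [he]
    · rfl

lemma foldl_rstep_keys (cur : PySem.Dict String Int) (ks : List String) :
    ∀ d, (∀ k ∈ ks, d.contains k = true) → (ks.foldl (rstep cur) d).keys = d.keys := by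
  induction ks with
  | nil => intro d _; rfl
  | cons k0 ks ih =>
      intro d h
      have hk := rstep_keys cur d k0 (h k0 (by simp))
      rw [List.foldl_cons, ih (rstep cur d k0) ?_, hk]
      intro k hk'
      rw [PySem.Dict.contains_eq_decide_mem_keys, hk, ← PySem.Dict.contains_eq_decide_mem_keys]
      exact h k (by simp [hk'])

lemma foldl_rstep_get? (cur : PySem.Dict String Int) (ks : List String) :
    ∀ d, ks.Nodup → (∀ k ∈ ks, d.contains k = true) → ∀ k,
      (ks.foldl (rstep cur) d).get? k =
        if k ∈ ks then (d.get? k).map (fun v => (if v.1 < cur.getD k 0 then cur.getD k 0 else v.1, v.2))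
        else d.get? k := by
  induction ks with
  | nil => intro d _ _ k; simp
  | cons k0 ks ih =>
      intro d hnd h k
      have hc0 : d.contains k0 = true := h k0 (by simp)
      have hsub : ∀ k ∈ ks, (rstep cur d k0).contains k = true := by
        intro k hk'
        rw [PySem.Dict.contains_eq_decide_mem_keys, rstep_keys cur d k0 hc0,
          ← PySem.Dict.contains_eq_decide_mem_keys]
        exact h k (by simp [hk'])
      rw [List.foldl_cons, ih (rstep cur d k0) hnd.of_cons hsub k, rstep_get? cur d k0 hc0 k]
      have hk0 : k0 ∉ ks := (List.nodup_cons.mp hnd).1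
      by_cases hmem : k ∈ ks
      · have : k ≠ k0 := fun e => hk0 (e ▸ hmem)
        simp [hmem, this]
      · by_cases he : k = k0
        · subst he; simp [hmem]
        · simp [hmem, he]

lemma second_keys (ft : PySem.Dict String (Int × Bool)) (cur : PySem.Dict String Int)
    (hsub : ∀ k ∈ cur.keys, ft.contains k = true) : (pyASecond ft cur).keys = ft.keys :=
  foldl_rstep_keys cur cur.keys ft hsub

lemma second_get? (ft : PySem.Dict String (Int × Bool)) (cur : PySem.Dict String Int)
    (hnd : cur.keys.Nodup) (hsub : ∀ k ∈ cur.keys, ft.contains k = true) (k : String) :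
    (pyASecond ft cur).get? k =
      if k ∈ cur.keys then
        (ft.get? k).map (fun v => (if v.1 < cur.getD k 0 then cur.getD k 0 else v.1, v.2))
      else ft.get? k :=
  foldl_rstep_get? cur cur.keys ft hnd hsub k

lemma dict_eq_of_get? (d1 d2 : PySem.Dict String (Int × Bool)) (hk : d1.keys = d2.keys)
    (hnd : d1.keys.Nodup) (h : ∀ k, d1.get? k = d2.get? k) : d1 = d2 := by
  apply PySem.Dict.ext
  rw [PySem.Dict.items_eq_map_keys d1 hnd ((0:Int), false),
      PySem.Dict.items_eq_map_keys d2 (hk ▸ hnd) ((0:Int), false), ← hk]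
  apply List.map_congr_left
  intro k _
  simp [PySem.Dict.getD_eq_get?_getD, h k]

-- characterization of B's aggregation fold over a duplicate-free letter list
lemma Bfold_char (gs rs : List Char) (L : List Char) :
    ∀ (D : PySem.Dict String (Int × Bool)), L.Nodup → D.keys.Nodup →
    ((L.foldl (pyBUpd gs rs) D).keys
        = D.keys ++ (L.filter (fun c => !(D.contains (strc c)))).map strc)
    ∧ (∀ k, (L.foldl (pyBUpd gs rs) D).get? k =
        if (L.any (fun c => strc c == k)) then some (bSpec gs rs (D.getD k (0,false)) k)
        else D.get? k) := by
  induction L with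
  | nil =>
      intro D _ _
      simp
  | cons c L ih =>
      intro D hnd hD
      have hcL : c ∉ L := (List.nodup_cons.mp hnd).1
      have hfold : pyBUpd gs rs D c
          = D.insert (strc c) (bSpec gs rs (D.getD (strc c) (0,false)) (strc c)) := by
        unfold pyBUpd bSpec
        rw [cnt_strc, lock_strc]
        rfl
      rw [List.foldl_cons, hfold]
      obtain ⟨ihk, ihg⟩ := ih (D.insert (strc c) (bSpec gs rs (D.getD (strc c) (0,false)) (strc c)))
        (List.nodup_cons.mp hnd).2 (PySem.Dict.nodup_keys_insert _ _ _ hD)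
      have hfc : L.filter (fun c' => !((D.insert (strc c) (bSpec gs rs (D.getD (strc c) (0,false)) (strc c))).contains (strc c')))
          = L.filter (fun c' => !(D.contains (strc c'))) := by
        apply List.filter_congr
        intro c' hc'
        have hbne : (strc c' == strc c) = false := by
          rw [strc_beq]
          simp only [beq_eq_false_iff_ne, ne_eq]
          exact fun e => hcL (e ▸ hc')
        rw [PySem.Dict.contains_insert, hbne, Bool.false_or]
      constructor
      · rw [ihk, hfc]
        cases hDc : D.contains (strc c)
        · rw [PySem.Dict.keys_insert_of_not_contains _ _ hDc, List.filter_cons]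
          simp [hDc]
        · rw [PySem.Dict.keys_insert_of_contains _ _ hDc, List.filter_cons]
          simp [hDc]
      · intro k
        rw [ihg k]
        by_cases hany : L.any (fun c' => strc c' == k) = true
        · have hkne : k ≠ strc c := by
            rw [List.any_eq_true] at hany
            obtain ⟨c', hc', hb⟩ := hany
            rw [beq_iff_eq] at hb
            intro he
            exact hcL (strc_inj (hb.trans he) ▸ hc')
          rw [if_pos hany, if_pos (by rw [List.any_cons, hany]; simp),
            PySem.Dict.getD_insert, if_neg hkne]
        · by_cases hkc : k = strc c
          · rw [if_neg (by simp [hany]), if_pos (by rw [List.any_cons]; subst hkc; simp),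
              PySem.Dict.get?_insert, if_pos hkc]
            subst hkc
            rfl
          · have hbc : (strc c == k) = false := by
              simp only [beq_eq_false_iff_ne, ne_eq]
              exact fun e => hkc e.symm
            rw [if_neg (by simp [hany]), if_neg (by rw [List.any_cons, hbc]; simp [hany]),
              PySem.Dict.get?_insert, if_neg hkc]

-- ===== VERDICT (by name: the statement is the Claim_ definition above) =====
theorem updateFrequencyTable_spec : Claim_equal_updateFrequencyTable := by
  intro ft em guess result _ hpre
  obtain ⟨hnd, hlen, _⟩ := hpre
  have hD0 : (PySem.Dict.mk ft).keys.Nodup := by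
    simpa [PySem.Dict.keys] using hnd
  obtain ⟨h1, h2, h3, h4, h5, h6, h7⟩ :=
    AInv_fold guess.toList result.toList (PySem.Dict.mk ft) em hD0 guess.toList.length le_rfl
  obtain ⟨bk, bg⟩ := Bfold_char guess.toList result.toList (PySem.List.dedup guess.toList)
    (PySem.Dict.mk ft) (PySem.List.nodup_dedup guess.toList) hD0
  set s := (List.range guess.toList.length).foldl (pyAStep guess.toList result.toList)
    (PySem.Dict.mk ft, em, PySem.Dict.empty) with hs
  have hsub : ∀ k ∈ s.2.2.keys, s.1.contains k = true := by
    intro k hk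
    have hc := (h6 k).mp hk
    have ho := cnt_ne_zero_occ guess.toList result.toList le_rfl k hc
    rw [PySem.Dict.contains_eq_isSome_get?, h4 k, ho, if_pos rfl]
    rfl
  have hocc_any : ∀ k, ((PySem.List.dedup guess.toList).any (fun c => strc c == k))
      = occS guess.toList guess.toList.length k := by
    intro k
    rw [Bool.eq_iff_iff]
    unfold occS
    rw [List.take_length]
    simp
  have hdict : pyASecond s.1 s.2.2
      = (PySem.List.dedup guess.toList).foldl (pyBUpd guess.toList result.toList)
          (PySem.Dict.mk ft) := by
    apply dict_eq_of_get?
    · rw [second_keys s.1 s.2.2 hsub, h2, List.take_length, bk]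
    · rw [second_keys s.1 s.2.2 hsub]
      exact h3
    · intro k
      rw [second_get? s.1 s.2.2 h5 hsub k, bg k, hocc_any k]
      by_cases hc : cntS guess.toList result.toList guess.toList.length k = 0
      · have hmem : k ∉ s.2.2.keys := fun hm => ((h6 k).mp hm) hc
        rw [if_neg hmem, h4 k]
        cases ho : occS guess.toList guess.toList.length k
        · rw [if_neg (by simp), if_neg (by simp)]
        · rw [if_pos rfl, if_pos rfl]
          unfold bSpec
          rw [if_neg (by simpa using hc)]
      · have hmem : k ∈ s.2.2.keys := (h6 k).mpr hc
        have ho := cnt_ne_zero_occ guess.toList result.toList le_rfl k hc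
        rw [if_pos hmem, h4 k, ho, if_pos rfl, if_pos rfl, h7 k]
        unfold bSpec
        rw [if_pos (by simpa using hc)]
        simp only [Option.map_some, Option.some.injEq, Prod.mk.injEq, and_true]
        rw [max_def]
        split_ifs <;> omega
  simp only [Spec_updateFrequencyTable, updateFrequencyTable, updateFrequencyTable_alt]
  rw [← hs, hdict, h1]
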